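-- pv_equiv track=rewrite | github.com/kevinsung123/Python | effective_python/betterway16.py | index_file
-- ===== SOURCE A (Python) =====
-- def index_file(text):
--     offset = 0
--     for line in text:
--         if line:
--             yield offset
--         for letter in line:
--             offset += 1
--             if letter == ' ':
--                 yield offset
-- ===== SOURCE B (Python) =====
-- def index_file(text):
--     # Per-line offset bookkeeping: for each line yield its base offset (if the
--     # line is non-empty), then jump between spaces with str.find instead of
--     # walking every character, and advance the offset once per line by len(line).
--     offset = 0
--     for line in text:
--         if line:
--             yield offset
--         pos = line.find(' ')
--         while pos != -1:
--             yield offset + pos + 1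
--             pos = line.find(' ', pos + 1)
--         offset += len(line)
-- ===== Notes on version B (the rewrite author's own statement) =====
-- stated objective: alternative
-- what changed: Replaces the single character-by-character counter (offset incremented inside the inner loop) with per-line bookkeeping: the base offset advances once per line by len(line), and space offsets are found by jumping with repeated str.find(' ', pos) instead of inspecting every character.
import Mathlib
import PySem

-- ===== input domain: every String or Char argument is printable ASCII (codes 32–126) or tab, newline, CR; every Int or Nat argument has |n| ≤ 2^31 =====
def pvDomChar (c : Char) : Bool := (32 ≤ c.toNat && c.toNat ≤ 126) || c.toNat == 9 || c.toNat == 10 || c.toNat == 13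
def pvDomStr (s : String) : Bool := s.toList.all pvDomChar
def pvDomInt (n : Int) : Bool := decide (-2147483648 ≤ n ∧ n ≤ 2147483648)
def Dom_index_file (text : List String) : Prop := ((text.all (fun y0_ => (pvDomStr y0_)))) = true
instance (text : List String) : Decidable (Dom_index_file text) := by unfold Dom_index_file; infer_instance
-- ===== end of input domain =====

-- B replaces A's character-by-character offset counter with per-line bookkeeping
-- (base offset advanced by len(line) once per line, spaces located by repeated
-- str.find): an alternative decomposition of the same O(total chars) work.


-- ===== PORT A =====
-- state = (offset, yielded-so-far); the inner loop walks every character,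
-- incrementing offset and yielding after each space.
def index_file (text : List String) : List Int :=
  (text.foldl (fun (st : Int × List Int) line =>
    let st := if line ≠ "" then (st.1, st.2 ++ [st.1]) else st
    line.toList.foldl (fun (st : Int × List Int) letter =>
      let offset := st.1 + 1
      (offset, if letter = ' ' then st.2 ++ [offset] else st.2)) st)
    (0, [])).2

-- ===== PORT B =====
-- the 'while pos != -1' loop of Source B; fuel (cs.length + 1) only makes the
-- recursion structural — each found position is a fresh index into the line.
def pvSpaceLoop (cs : List Char) (offset : Int) : Int → Nat → List Int
  | _, 0 => []
  | pos, fuel + 1 =>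
    if pos = -1 then []
    else (offset + pos + 1) :: pvSpaceLoop cs offset (PySem.Chars.findFrom cs [' '] (pos + 1) none) fuel

def index_file_alt (text : List String) : List Int :=
  (text.foldl (fun (st : Int × List Int) line =>
    let cs := line.toList
    let acc := if line ≠ "" then st.2 ++ [st.1] else st.2
    (st.1 + PySem.Str.len line,
     acc ++ pvSpaceLoop cs st.1 (PySem.Chars.find cs [' ']) (cs.length + 1)))
    (0, [])).2

-- ===== PRECONDITION & SPEC =====
def Spec_index_file (text : List String) (out : List Int) : Prop := out = index_file_alt text
instance (text : List String) (out : List Int) : Decidable (Spec_index_file text out) := by unfold Spec_index_file; infer_instance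

-- ===== CLAIM (what is proved, stated in full; the proofs are below) =====
def Claim_equal_index_file : Prop := ∀ (text : List String), Dom_index_file text → Spec_index_file text (index_file text)

-- ===== LEMMAS AND PROOFS =====

-- the common semantics of one line: offsets just past each space, base `off`
def pvSpacePos : List Char → Int → List Int
  | [], _ => []
  | c :: rest, off =>
    if c = ' ' then (off + 1) :: pvSpacePos rest (off + 1) else pvSpacePos rest (off + 1)

theorem pvSpacePos_no_space (cs : List Char) (off : Int) (h : ' ' ∉ cs) :
    pvSpacePos cs off = [] := by
  induction cs generalizing off with
  | nil => rfl
  | cons c rest ih =>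
    simp only [List.mem_cons, not_or] at h
    simp [pvSpacePos, Ne.symm h.1, ih _ h.2]

theorem pvSpacePos_append (u v : List Char) (off : Int) :
    pvSpacePos (u ++ v) off = pvSpacePos u off ++ pvSpacePos v (off + u.length) := by
  induction u generalizing off with
  | nil => simp [pvSpacePos]
  | cons c rest ih =>
    simp only [List.cons_append, pvSpacePos]
    split <;> simp [ih, add_assoc] <;> ring_nf

theorem pv_singleton_prefix {c : Char} {l : List Char} :
    [c] <+: l ↔ ∃ t, l = c :: t := by
  constructor
  · rintro ⟨t, rfl⟩; exact ⟨t, rfl⟩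
  · rintro ⟨t, rfl⟩; exact ⟨t, rfl⟩

-- A's inner character loop computes pvSpacePos
theorem pvInnerA (cs : List Char) (off : Int) (acc : List Int) :
    cs.foldl (fun (st : Int × List Int) letter =>
      let offset := st.1 + 1
      (offset, if letter = ' ' then st.2 ++ [offset] else st.2)) (off, acc)
    = (off + cs.length, acc ++ pvSpacePos cs off) := by
  induction cs generalizing off acc with
  | nil => simp [pvSpacePos]
  | cons c rest ih =>
    simp only [List.foldl_cons, pvSpacePos]
    by_cases hc : c = ' '
    · simp [hc, ih, add_comm]
      ring_nf
    · simp [hc, ih, add_comm]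
      ring_nf

-- B's find-jumping loop computes pvSpacePos (of the remaining suffix)
theorem pvLoop_eq (fuel : Nat) (cs : List Char) (off : Int) (k : Nat)
    (hk : k ≤ cs.length) (hf : cs.length + 1 - k ≤ fuel) :
    pvSpaceLoop cs off (PySem.Chars.findFrom cs [' '] (k : Int) none) fuel
      = pvSpacePos (cs.drop k) (off + k) := by
  induction fuel generalizing k with
  | zero => omega
  | succ f ih =>
    by_cases hneg : PySem.Chars.findFrom cs [' '] (k : Int) none = -1
    · rw [hneg]
      have hnp : ¬ ([' '] <:+: cs.drop k) :=
        (PySem.Chars.findFrom_natCast_eq_neg_one_iff cs [' '] k hk).mp hneg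
      have hmem : ' ' ∉ cs.drop k := by
        intro hm
        obtain ⟨s, t, hst⟩ := List.mem_iff_append.mp hm
        exact hnp ⟨s, t, by simp [hst]⟩
      simp [pvSpaceLoop, pvSpacePos_no_space _ _ hmem]
    · obtain ⟨hle, hpre, hmin⟩ := PySem.Chars.findFrom_natCast_spec cs [' '] k hk hneg
      set r := PySem.Chars.findFrom cs [' '] (k : Int) none with hr
      have hr0 : 0 ≤ r := le_trans (by exact_mod_cast Int.natCast_nonneg k) hle
      set m := r.toNat with hm
      have hrm : r = (m : Int) := (Int.toNat_of_nonneg hr0).symm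
      obtain ⟨t, ht⟩ := pv_singleton_prefix.mp hpre
      have hmlt : m < cs.length := by
        by_contra hge
        have : cs.drop m = [] := List.drop_eq_nil_of_le (by omega)
        rw [this] at ht; exact (List.cons_ne_nil _ _) ht.symm
      have hkm : k ≤ m := by omega
      have h3 : cs.drop m = ' ' :: cs.drop (m + 1) := by
        have hd : cs.drop (m + 1) = t := by
          have := congrArg (List.drop 1) ht
          simpa [List.drop_drop] using this
        rw [ht, hd]
      -- split cs.drop k = u ++ ' ' :: cs.drop (m+1), u space-free, |u| = m - k
      have hsplit : cs.drop k = (cs.drop k).take (m - k) ++ ' ' :: cs.drop (m + 1) := by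
        have h2 : (cs.drop k).drop (m - k) = cs.drop m := by
          rw [List.drop_drop]; congr 1; omega
        calc cs.drop k = (cs.drop k).take (m - k) ++ (cs.drop k).drop (m - k) :=
              (List.take_append_drop _ _).symm
          _ = (cs.drop k).take (m - k) ++ cs.drop m := by rw [h2]
          _ = (cs.drop k).take (m - k) ++ ' ' :: cs.drop (m + 1) := by rw [h3]
      have hulen : ((cs.drop k).take (m - k)).length = m - k := by
        rw [List.length_take, List.length_drop]; omega
      have hufree : ' ' ∉ (cs.drop k).take (m - k) := by
        intro hmem
        obtain ⟨i, hi, hget⟩ := List.getElem_of_mem hmem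
        rw [hulen] at hi
        have hik : k + i < m := by omega
        have higet : cs[k + i]'(by omega) = ' ' := by
          rw [List.getElem_take, List.getElem_drop] at hget
          exact hget
        have hdropi : cs.drop (k + i) = ' ' :: cs.drop (k + i + 1) := by
          rw [List.drop_eq_getElem_cons (by omega), higet]
        exact hmin (k + i) (by exact_mod_cast by omega) hik (by rw [hdropi]; exact ⟨_, rfl⟩)
      -- one loop step, then the induction hypothesis at position m + 1
      have hstep : pvSpaceLoop cs off r (f + 1)
          = (off + r + 1) :: pvSpaceLoop cs off (PySem.Chars.findFrom cs [' '] (r + 1) none) f := by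
        simp [pvSpaceLoop, hneg]
      have hih : pvSpaceLoop cs off (PySem.Chars.findFrom cs [' '] ((m + 1 : Nat) : Int) none) f
          = pvSpacePos (cs.drop (m + 1)) (off + (m + 1 : Nat)) :=
        ih (m + 1) (by omega) (by omega)
      rw [hstep, hrm]
      have hcast : ((m : Int) + 1) = ((m + 1 : Nat) : Int) := by push_cast; ring
      rw [hcast, hih]
      rw [hsplit, pvSpacePos_append, pvSpacePos_no_space _ _ hufree]
      simp only [pvSpacePos, if_true, List.nil_append, hulen]
      congr 1
      · push_cast [Nat.cast_sub hkm]; ring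
      · congr 1; push_cast [Nat.cast_sub hkm]; ring

theorem pvLine_eq (line : String) (off : Int) :
    pvSpaceLoop line.toList off (PySem.Chars.find line.toList [' ']) (line.toList.length + 1)
      = pvSpacePos line.toList off := by
  have h0 : PySem.Chars.find line.toList [' ']
      = PySem.Chars.findFrom line.toList [' '] ((0 : Nat) : Int) none := by
    simp [PySem.Chars.findFrom_zero]
  rw [h0, pvLoop_eq (line.toList.length + 1) line.toList off 0 (by omega) (by omega)]
  simp

-- ===== VERDICT (by name: the statement is the Claim_ definition above) =====
theorem index_file_spec : Claim_equal_index_file := by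
  intro text _
  unfold Spec_index_file index_file index_file_alt
  congr 1
  apply List.foldl_ext
  intro st line _
  by_cases hL : line = ""
  · subst hL
    have hfind : PySem.Chars.find [] [' '] = -1 := by decide
    simp [pvSpaceLoop, PySem.Str.len_eq, hfind]
  · simp only [hL, ne_eq, not_false_eq_true, if_true, pvInnerA, pvLine_eq, PySem.Str.len_eq]
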